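-- pv_equiv track=rewrite | github.com/cmtsao/SAT-compiler-DPLL-solver | DPLLsolver.py | easycases
-- ===== SOURCE A (Python) =====
-- def propagate(clauses, values, literal, bool):
--     values.update({literal: bool})
--     deleted=0
--     i=0
--     while i< len(clauses):
--         j=0
--         while j < len(clauses[i]):
--             if (literal==clauses[i][j] and bool) or (literal+clauses[i][j]==0 and not bool):
--                 clauses.pop(i)
--                 i-=1
--                 deleted+=1
--                 break
--             elif (literal+ clauses[i][j]==0 and bool) or (literal==clauses[i][j] and not bool):
--                 clauses[i].pop(j)
--                 j-=1
--             j+=1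
--         i+=1
--     return deleted
--
-- def easycases(clauses, values, literalnum):
--     easyfound=False
--     i=0
--     while i<len(clauses):
--         if len(clauses[i])==1:
--             easyfound=True
--             if clauses[i][0]<0:
--                 i=max(0, i-propagate(clauses, values, abs(clauses[i][0]), False))
--             else:
--                 i=max(0, i-propagate(clauses, values, abs(clauses[i][0]), True))
--         i+=1
--     literalsnum=literalnum
--     for x in range(1, literalsnum+1):
--         possiblepure=x
--         literalfound= False
--         ispurelit= True
--         j=0
--         while j < len(clauses) and ispurelit:
--             k=0
--             while k < len(clauses[j]) and ispurelit:
--                 if not literalfound and (abs(clauses[j][k]) == possiblepure):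
--                     possiblepure=clauses[j][k]
--                     literalfound=True
--                 elif literalfound and (abs(clauses[j][k])==abs(possiblepure)):
--                     if clauses[j][k]==possiblepure:
--                         k+=1
--                         continue
--                     else:
--                         ispurelit=False
--                 k+=1
--             j+=1
--         if ispurelit and literalfound:
--             if possiblepure <0:
--                 propagate(clauses, values, abs(possiblepure), False)
--             else:
--                 propagate(clauses, values, abs(possiblepure), True)
--             easyfound=True
--     return easyfound
-- ===== SOURCE B (Python) =====
-- # B: same return value as A; side effects: clauses is rebuilt via comprehensions
-- # (same contents/order, fresh inner lists) and values gets the same updates.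
-- def easycases(clauses, values, literalnum):
--     easyfound = False
--     i = 0
--     while i < len(clauses):
--         if len(clauses[i]) == 1:
--             easyfound = True
--             lit = clauses[i][0]
--             values[abs(lit)] = lit >= 0
--             n0 = len(clauses)
--             clauses[:] = [[l for l in c if l != -lit] for c in clauses if lit not in c]
--             i = max(0, i - (n0 - len(clauses)))
--         i += 1
--     for x in range(1, literalnum + 1):
--         signs = {l for c in clauses for l in c if abs(l) == x}
--         if len(signs) == 1:
--             (pp,) = signs
--             values[abs(pp)] = pp >= 0
--             clauses[:] = [c for c in clauses if pp not in c]
--             easyfound = True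
--     return easyfound
-- ===== Notes on version B (the rewrite author's own statement) =====
-- stated objective: simpler
-- what changed: A's in-place propagate with index juggling (pop(i)/pop(j), i-=1, j-=1) becomes a single rebuild comprehension, and the pure-literal phase's stateful nested while scans (possiblepure/literalfound/ispurelit with early exits) become a set comprehension of the signs of each variable followed by one filter; the unit-clause traversal order and its max(0, i-deleted) index arithmetic are kept.
import Mathlib
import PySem

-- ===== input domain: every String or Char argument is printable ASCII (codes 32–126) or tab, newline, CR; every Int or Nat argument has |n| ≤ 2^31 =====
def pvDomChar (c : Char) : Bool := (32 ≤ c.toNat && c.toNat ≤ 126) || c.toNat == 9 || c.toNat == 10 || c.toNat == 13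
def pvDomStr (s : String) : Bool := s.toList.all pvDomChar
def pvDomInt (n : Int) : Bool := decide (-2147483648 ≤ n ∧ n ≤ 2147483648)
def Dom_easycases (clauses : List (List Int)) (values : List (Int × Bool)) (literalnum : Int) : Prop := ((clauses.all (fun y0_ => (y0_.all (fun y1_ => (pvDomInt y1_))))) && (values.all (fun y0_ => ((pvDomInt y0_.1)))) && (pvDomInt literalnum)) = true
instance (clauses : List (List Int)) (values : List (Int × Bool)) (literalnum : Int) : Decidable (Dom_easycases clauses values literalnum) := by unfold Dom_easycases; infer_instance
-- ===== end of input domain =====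

-- B replaces A's index-juggling `propagate` and A's stateful nested pure-literal scans by
-- filter/comprehension passes over the clause list (objective: simpler). Both Pythons mutate
-- `clauses` and `values` in place; the equivalence proved here is about the RETURN value
-- (B leaves the same clause contents and dict updates, but rebuilds the inner lists).

-- ===== PORT A =====
-- A's `propagate`, literal by literal. The inner while with `clauses[i].pop(j); j-=1; j+=1`
-- is a front-to-back scan dropping falsified literals; `break` + `clauses.pop(i); i-=1`
-- deletes a satisfied clause — `procClause` (none = clause deleted) and `propLoop`
-- (second component = `deleted`) transcribe exactly those two while loops.
def satA (lit : Int) (b : Bool) (l : Int) : Bool := (lit == l && b) || (lit + l == 0 && !b)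

def falsA (lit : Int) (b : Bool) (l : Int) : Bool := (lit + l == 0 && b) || (lit == l && !b)

def procClause (lit : Int) (b : Bool) : List Int → Option (List Int)
  | [] => some []
  | l :: r =>
    if satA lit b l then none
    else match procClause lit b r with
      | none => none
      | some cs => some (if falsA lit b l then cs else l :: cs)

def propLoop (lit : Int) (b : Bool) : List (List Int) → List (List Int) × Nat
  | [] => ([], 0)
  | c :: r =>
    match procClause lit b c with
    | none => ((propLoop lit b r).1, (propLoop lit b r).2 + 1)
    | some c' => (c' :: (propLoop lit b r).1, (propLoop lit b r).2)

def propagateA (cls : List (List Int)) (vals : PySem.Dict Int Bool) (lit : Int) (b : Bool) :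
    List (List Int) × PySem.Dict Int Bool × Nat :=
  ((propLoop lit b cls).1, vals.insert lit b, (propLoop lit b cls).2)

-- first while loop of `easycases` (unit clauses); `i = max(0, i-propagate(...))` is Nat
-- subtraction; `if clauses[i][0] < 0` picks the propagate call. The loop's progress measure
-- `len(clauses) - i` strictly drops each iteration (each unit-clause propagation deletes the
-- unit clause itself), so `fuel = len(clauses) + 1` (passed below) is never exhausted and the
-- `fuel = 0` guard only makes the recursion structural.
def loop1A (fuel : Nat) (cls : List (List Int)) (vals : PySem.Dict Int Bool) (i : Nat) (flag : Bool) :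
    List (List Int) × PySem.Dict Int Bool × Bool :=
  match fuel with
  | 0 => (cls, vals, flag)
  | fuel + 1 =>
    if h : i < cls.length then
      if cls[i].length == 1 then
        let lit := cls[i].headI
        let r := if lit < 0 then propagateA cls vals |lit| false else propagateA cls vals |lit| true
        loop1A fuel r.1 r.2.1 (i - r.2.2 + 1) true
      else loop1A fuel cls vals (i + 1) flag
    else (cls, vals, flag)

-- the two inner while loops of the pure-literal scan, with their `ispurelit` early exits
def scanLits (pp : Int) (found : Bool) : List Int → Int × Bool × Bool
  | [] => (pp, found, true)
  | l :: r =>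
    if !found && (|l| == pp) then scanLits l true r
    else if found && (|l| == |pp|) then
      (if l == pp then scanLits pp found r else (pp, found, false))
    else scanLits pp found r

def scanClauses (pp : Int) (found : Bool) : List (List Int) → Int × Bool × Bool
  | [] => (pp, found, true)
  | c :: r =>
    let s := scanLits pp found c
    if s.2.2 then scanClauses s.1 s.2.1 r else s

-- `for x in range(1, literalsnum+1)` of the pure-literal phase
def loop2A (fuel : Nat) (cls : List (List Int)) (vals : PySem.Dict Int Bool) (flag : Bool) (litnum x : Int) :
    List (List Int) × PySem.Dict Int Bool × Bool :=
  match fuel with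
  | 0 => (cls, vals, flag)
  | fuel + 1 =>
    if litnum + 1 ≤ x then (cls, vals, flag)
    else
      let s := scanClauses x false cls
      if s.2.2 && s.2.1 then
        let r := if s.1 < 0 then propagateA cls vals |s.1| false else propagateA cls vals |s.1| true
        loop2A fuel r.1 r.2.1 true litnum (x + 1)
      else loop2A fuel cls vals flag litnum (x + 1)

def easycases (clauses : List (List Int)) (values : List (Int × Bool)) (literalnum : Int) : Bool :=
  let p := loop1A (clauses.length + 1) clauses (PySem.Dict.mk values) 0 false
  (loop2A (literalnum.toNat + 1) p.1 p.2.1 p.2.2 literalnum 1).2.2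

-- ===== PORT B =====
-- Source B: `[[l for l in c if l != -lit] for c in clauses if lit not in c]`
def simplifyB (lit : Int) (cls : List (List Int)) : List (List Int) :=
  (cls.filter (fun c => !c.contains lit)).map (fun c => c.filter (fun l => l != -lit))

def loop1B (fuel : Nat) (cls : List (List Int)) (vals : PySem.Dict Int Bool) (i : Nat) (flag : Bool) :
    List (List Int) × PySem.Dict Int Bool × Bool :=
  match fuel with
  | 0 => (cls, vals, flag)
  | fuel + 1 =>
    if h : i < cls.length then
      if cls[i].length == 1 then
        let lit := cls[i].headI
        let cls' := simplifyB lit cls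
        loop1B fuel cls' (vals.insert |lit| (decide (0 ≤ lit))) (i - (cls.length - cls'.length) + 1) true
      else loop1B fuel cls vals (i + 1) flag
    else (cls, vals, flag)

-- Source B: `signs = {l for c in clauses for l in c if abs(l) == x}`
def puresB (x : Int) (cls : List (List Int)) : PySem.Set Int :=
  PySem.Set.ofList (cls.flatMap (fun c => c.filter (fun l => |l| == x)))

def loop2B (fuel : Nat) (cls : List (List Int)) (vals : PySem.Dict Int Bool) (flag : Bool) (litnum x : Int) :
    List (List Int) × PySem.Dict Int Bool × Bool :=
  match fuel with
  | 0 => (cls, vals, flag)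
  | fuel + 1 =>
    if litnum + 1 ≤ x then (cls, vals, flag)
    else
      match puresB x cls with
      | [pp] =>
        loop2B fuel (cls.filter (fun c => !c.contains pp)) (vals.insert |pp| (decide (0 ≤ pp))) true litnum (x + 1)
      | _ => loop2B fuel cls vals flag litnum (x + 1)

def easycases_alt (clauses : List (List Int)) (values : List (Int × Bool)) (literalnum : Int) : Bool :=
  let p := loop1B (clauses.length + 1) clauses (PySem.Dict.mk values) 0 false
  (loop2B (literalnum.toNat + 1) p.1 p.2.1 p.2.2 literalnum 1).2.2

-- ===== PRECONDITION & SPEC =====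
def Spec_easycases (clauses : List (List Int)) (values : List (Int × Bool)) (literalnum : Int) (out : Bool) : Prop := out = easycases_alt clauses values literalnum
instance (clauses : List (List Int)) (values : List (Int × Bool)) (literalnum : Int) (out : Bool) : Decidable (Spec_easycases clauses values literalnum out) := by unfold Spec_easycases; infer_instance

-- ===== CLAIM (what is proved, stated in full; the proofs are below) =====
def Claim_equal_easycases : Prop := ∀ (clauses : List (List Int)) (values : List (Int × Bool)) (literalnum : Int), Dom_easycases clauses values literalnum → Spec_easycases clauses values literalnum (easycases clauses values literalnum)

-- ===== LEMMAS AND PROOFS =====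

theorem sat_eq (lit l : Int) (b : Bool) (hb : b = decide (0 ≤ lit)) :
    satA |lit| b l = (l == lit) := by
  subst hb
  rw [Bool.eq_iff_iff]
  rcases le_or_gt 0 lit with h | h
  · simp [satA, abs_of_nonneg h, h, beq_iff_eq]
    omega
  · simp [satA, abs_of_neg h, not_le.mpr h, beq_iff_eq]
    omega

theorem fals_eq (lit l : Int) (b : Bool) (hb : b = decide (0 ≤ lit)) :
    falsA |lit| b l = (l == -lit) := by
  subst hb
  rw [Bool.eq_iff_iff]
  rcases le_or_gt 0 lit with h | h
  · simp [falsA, abs_of_nonneg h, h, beq_iff_eq]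
    omega
  · simp [falsA, abs_of_neg h, not_le.mpr h, beq_iff_eq]
    omega

theorem procClause_spec (lit : Int) (b : Bool) (hb : b = decide (0 ≤ lit)) (c : List Int) :
    procClause |lit| b c =
      if c.contains lit then none else some (c.filter (fun l => l != -lit)) := by
  induction c with
  | nil => simp [procClause]
  | cons l r ih =>
    rw [procClause, sat_eq lit l b hb, ih, fals_eq lit l b hb]
    by_cases h1 : l = lit
    · simp [h1]
    · by_cases h : lit ∈ r
      · simp [beq_iff_eq, h1, h]
      · by_cases h2 : l = -lit
        · have h3 : ¬ lit = -lit := by omega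
          (simp [beq_iff_eq, h, h2, h3]; omega)
        · have h1' : ¬ lit = l := fun hh => h1 hh.symm
          simp [beq_iff_eq, h, h2, h1, h1']

theorem propLoop_spec (lit : Int) (b : Bool) (hb : b = decide (0 ≤ lit)) (cls : List (List Int)) :
    propLoop |lit| b cls = (simplifyB lit cls, cls.countP (fun c => c.contains lit)) := by
  induction cls with
  | nil => simp [propLoop, simplifyB]
  | cons c r ih =>
    simp only [propLoop, procClause_spec lit b hb, ih]
    by_cases h : lit ∈ c <;>
      simp [h, simplifyB]

theorem simplifyB_len_le (lit : Int) (cls : List (List Int)) :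
    (simplifyB lit cls).length ≤ cls.length := by
  simpa [simplifyB] using List.length_filter_le (fun c => !c.contains lit) cls

theorem simplifyB_cons (lit : Int) (c : List Int) (r : List (List Int)) :
    simplifyB lit (c :: r) =
      if lit ∈ c then simplifyB lit r else c.filter (fun l => l != -lit) :: simplifyB lit r := by
  by_cases h : lit ∈ c <;> simp [simplifyB, h]

theorem simplifyB_len (lit : Int) (cls : List (List Int)) :
    cls.length - (simplifyB lit cls).length = cls.countP (fun c => c.contains lit) := by
  induction cls with
  | nil => simp [simplifyB]
  | cons c r ih =>
    have hle := simplifyB_len_le lit r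
    rw [simplifyB_cons]
    by_cases h : lit ∈ c <;> simp [h] at ih ⊢ <;> omega

theorem propagateA_spec (cls : List (List Int)) (vals : PySem.Dict Int Bool) (lit : Int) :
    (if lit < 0 then propagateA cls vals |lit| false else propagateA cls vals |lit| true) =
      (simplifyB lit cls, vals.insert |lit| (decide (0 ≤ lit)), cls.countP (fun c => c.contains lit)) := by
  rcases le_or_gt 0 lit with h | h
  · rw [if_neg (not_lt.mpr h)]
    simp [propagateA, propLoop_spec lit true (by simp [h]), h]
  · rw [if_pos h]
    simp [propagateA, propLoop_spec lit false (by simp [not_le.mpr h]), not_le.mpr h]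

theorem loop1_eq (fuel : Nat) : ∀ (cls : List (List Int)) (vals : PySem.Dict Int Bool) (i : Nat) (flag : Bool),
    loop1A fuel cls vals i flag = loop1B fuel cls vals i flag := by
  induction fuel with
  | zero => intro cls vals i flag; rfl
  | succ fuel ih =>
    intro cls vals i flag
    rw [loop1A, loop1B]
    by_cases h : i < cls.length
    · simp only [dif_pos h]
      by_cases hlen : (cls[i].length == 1) = true
      · simp only [if_pos hlen]
        rw [propagateA_spec, ← simplifyB_len]
        dsimp only
        exact ih _ _ _ _
      · simp only [if_neg hlen]
        exact ih _ _ _ _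
    · simp [h]

theorem scanLits_true (pp : Int) (lits : List Int) :
    scanLits pp true lits = (pp, true, (lits.filter (fun l => |l| == |pp|)).all (· == pp)) := by
  induction lits with
  | nil => simp [scanLits]
  | cons l r ih =>
    rw [scanLits]
    by_cases h : (|l| == |pp|) = true
    · by_cases h2 : (l == pp) = true
      · simp [h, h2, ih]
      · simp [h, h2]
    · simp [h, ih]

theorem scanLits_false (x : Int) (lits : List Int) :
    scanLits x false lits =
      match lits.filter (fun l => |l| == x) with
      | [] => (x, false, true)
      | l₀ :: rest => (l₀, true, rest.all (· == l₀)) := by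
  induction lits with
  | nil => simp [scanLits]
  | cons l r ih =>
    rw [scanLits]
    by_cases h : (|l| == x) = true
    · have hx : |l| = x := by simpa using h
      subst hx
      simp [scanLits_true]
    · simp [h, ih]

theorem scanClauses_true (pp : Int) (cls : List (List Int)) :
    scanClauses pp true cls =
      (pp, true, (cls.flatMap (fun c => c.filter (fun l => |l| == |pp|))).all (· == pp)) := by
  induction cls with
  | nil => simp [scanClauses]
  | cons c r ih =>
    rw [scanClauses]
    simp only [scanLits_true]
    by_cases h : ((c.filter (fun l => |l| == |pp|)).all (· == pp)) = true <;>
      simp [h, ih, List.all_append]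

theorem scan_spec (x : Int) (cls : List (List Int)) :
    scanClauses x false cls =
      match cls.flatMap (fun c => c.filter (fun l => |l| == x)) with
      | [] => (x, false, true)
      | l₀ :: rest => (l₀, true, rest.all (· == l₀)) := by
  induction cls with
  | nil => simp [scanClauses]
  | cons c r ih =>
    rw [scanClauses]
    simp only [scanLits_false]
    cases hc : c.filter (fun l => |l| == x) with
    | nil => simpa [List.flatMap_cons, hc] using ih
    | cons l₀ restc =>
      have hl₀ : |l₀| = x := by
        have : l₀ ∈ c.filter (fun l => |l| == x) := by rw [hc]; exact List.mem_cons_self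
        simpa using (List.of_mem_filter this)
      by_cases hall : (restc.all (· == l₀)) = true
      · subst hl₀
        simp [hall, scanClauses_true, List.flatMap_cons, hc, List.all_append]
      · simp [hall, List.flatMap_cons, hc, List.all_append]

theorem ofList_all_eq (l₀ : Int) (rest : List Int) (h : (rest.all (· == l₀)) = true) :
    PySem.Set.ofList (l₀ :: rest) = [l₀] := by
  have base : PySem.Set.ofList (l₀ :: rest) = rest.foldl PySem.Set.add [l₀] := by
    simp [PySem.Set.ofList, PySem.Set.add, PySem.Set.contains]
  rw [base]
  clear base
  induction rest with
  | nil => rfl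
  | cons l r ih =>
    simp only [List.all_cons, Bool.and_eq_true, beq_iff_eq] at h
    obtain ⟨rfl, h2⟩ := h
    simpa [PySem.Set.add, PySem.Set.contains] using ih h2

theorem pure_simplify (x l₀ : Int) (cls : List (List Int)) (hx : |l₀| = x) (hx1 : 1 ≤ x)
    (hall : ∀ l ∈ cls.flatMap (fun c => c.filter (fun l => |l| == x)), l = l₀) :
    simplifyB l₀ cls = cls.filter (fun c => !c.contains l₀) := by
  unfold simplifyB
  apply List.map_congr_left ?_ |>.trans (List.map_id _)
  intro c hc
  have hc' : c ∈ cls := (List.mem_filter.mp hc).1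
  apply List.filter_eq_self.mpr
  intro l hl
  simp only [bne_iff_ne, ne_eq]
  intro hneg
  have : l ∈ cls.flatMap (fun c => c.filter (fun l => |l| == x)) := by
    apply List.mem_flatMap.mpr
    exact ⟨c, hc', List.mem_filter.mpr ⟨hl, by simp [hneg, abs_neg, hx]⟩⟩
  have h0 : l₀ = 0 := by have := hall l this; omega
  rw [h0] at hx
  simp at hx
  omega

theorem loop2_eq (fuel : Nat) : ∀ (cls : List (List Int)) (vals : PySem.Dict Int Bool) (flag : Bool)
    (litnum x : Int), 1 ≤ x →
    loop2A fuel cls vals flag litnum x = loop2B fuel cls vals flag litnum x := by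
  induction fuel with
  | zero => intro cls vals flag litnum x hx; rfl
  | succ n ih =>
    intro cls vals flag litnum x hx
    rw [loop2A, loop2B]
    by_cases h : litnum + 1 ≤ x
    · simp [h]
    · simp only [if_neg h]
      rw [scan_spec]
      cases hocc : cls.flatMap (fun c => c.filter (fun l => |l| == x)) with
      | nil =>
        have hp : puresB x cls = [] := by simp [puresB, hocc, PySem.Set.ofList]
        rw [hp]
        simpa using ih cls vals flag litnum (x + 1) (by omega)
      | cons l₀ rest =>
        have hl₀ : |l₀| = x := by
          have hm : l₀ ∈ cls.flatMap (fun c => c.filter (fun l => |l| == x)) := by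
            rw [hocc]; exact List.mem_cons_self
          obtain ⟨c, _, hmem⟩ := List.mem_flatMap.mp hm
          simpa using (List.of_mem_filter hmem)
        by_cases hall : (rest.all (· == l₀)) = true
        · have hp : puresB x cls = [l₀] := by
            rw [puresB, hocc]; exact ofList_all_eq l₀ rest hall
          have hall' : ∀ l ∈ cls.flatMap (fun c => c.filter (fun l => |l| == x)), l = l₀ := by
            intro l hl
            rw [hocc] at hl
            rcases List.mem_cons.mp hl with h1 | h1
            · exact h1
            · simpa using (List.all_eq_true.mp hall) l h1
          rw [hp]
          simp only [hall, Bool.and_true, if_pos]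
          rw [propagateA_spec]
          dsimp only
          rw [pure_simplify x l₀ cls hl₀ hx hall']
          exact ih _ _ _ _ _ (by omega)
        · simp only [Bool.not_eq_true] at hall
          obtain ⟨l', hl', hne⟩ : ∃ l' ∈ rest, l' ≠ l₀ := by
            by_contra hcon
            push Not at hcon
            rw [List.all_eq_true.mpr (fun l hl => by simpa using hcon l hl)] at hall
            simp at hall
          have hml : l₀ ∈ puresB x cls := by
            rw [puresB, PySem.Set.mem_ofList, hocc]; exact List.mem_cons_self
          have hml' : l' ∈ puresB x cls := by
            rw [puresB, PySem.Set.mem_ofList, hocc]; exact List.mem_cons_of_mem _ hl'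
          simp only [hall, Bool.false_and]
          cases hp : puresB x cls with
          | nil => rw [hp] at hml; simp at hml
          | cons pp tl =>
            cases tl with
            | nil =>
              rw [hp] at hml hml'
              simp at hml hml'
              exact absurd (hml.trans hml'.symm) (fun hh => hne hh.symm)
            | cons q t =>
              simp only
              exact ih _ _ _ _ _ (by omega)

-- ===== VERDICT (by name: the statement is the Claim_ definition above) =====
theorem easycases_spec : Claim_equal_easycases := by
  intro clauses values literalnum _
  unfold Spec_easycases easycases easycases_alt
  rw [loop1_eq]
  exact congrArg (fun t : List (List Int) × PySem.Dict Int Bool × Bool => t.2.2)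
    (loop2_eq _ _ _ _ _ 1 le_rfl)
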